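-- pv_equiv track=rewrite | github.com/Neogul02/Algorithm | 백준/Silver/3085. 사탕 게임/사탕 게임.py | max_same
-- ===== SOURCE A (Python) =====
-- def max_same(grid):
--     n = len(grid)
--     ans = 1
--     for i in range(n):
--         cnt = 1
--         for j in range(1, n):
--             if grid[i][j] == grid[i][j-1]:
--                 cnt += 1
--             else:
--                 if cnt > ans: ans = cnt
--                 cnt = 1
--         if cnt > ans: ans = cnt
--     for j in range(n):
--         cnt = 1
--         for i in range(1, n):
--             if grid[i][j] == grid[i-1][j]:
--                 cnt += 1
--             else:
--                 if cnt > ans: ans = cnt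
--                 cnt = 1
--         if cnt > ans: ans = cnt
--     return ans
-- ===== SOURCE B (Python) =====
-- def max_same(grid):
--     n = len(grid)
--     if n < 2:
--         return 1  # at most one cell per scanned line
--     lines = [row[:n] for row in grid] + [[row[j] for row in grid] for j in range(n)]
--
--     def has_window(L):
--         # a window line[i:i+L] is uniform iff it equals itself shifted by one
--         return any(line[i:i+L-1] == line[i+1:i+L]
--                    for line in lines
--                    for i in range(n - L + 1))
--
--     lo, hi = 1, n  # invariant: greatest uniform-window length lies in [lo, hi]
--     while lo < hi:
--         mid = (lo + hi + 1) // 2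
--         if has_window(mid):
--             lo = mid
--         else:
--             hi = mid - 1
--     return lo
-- ===== Notes on version B (the rewrite author's own statement) =====
-- stated objective: alternative
-- what changed: Replaces A's single-pass run-length counting with binary search on the answer: a decision procedure asks whether any row/column of the n-by-n square contains a uniform window of length L (tested by comparing each window slice with its shift by one), and the greatest feasible L is located by halving the interval [1, n].
import Mathlib
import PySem

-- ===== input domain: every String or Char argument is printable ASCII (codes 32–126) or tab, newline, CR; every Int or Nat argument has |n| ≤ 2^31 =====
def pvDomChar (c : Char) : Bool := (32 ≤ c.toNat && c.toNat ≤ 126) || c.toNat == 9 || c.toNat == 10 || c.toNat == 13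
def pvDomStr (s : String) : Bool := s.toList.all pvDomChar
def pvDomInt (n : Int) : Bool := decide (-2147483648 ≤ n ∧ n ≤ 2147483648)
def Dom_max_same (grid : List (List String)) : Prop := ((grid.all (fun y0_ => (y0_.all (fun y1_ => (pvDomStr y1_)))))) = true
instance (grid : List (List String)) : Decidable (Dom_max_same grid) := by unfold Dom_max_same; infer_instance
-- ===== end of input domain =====

-- B replaces A's incremental run counting by binary search on the answer: a decision
-- procedure checks whether some row/column has a uniform window of length L (a slice
-- compared with its shift by one), and the largest feasible L is found by halving [1, n].

-- ===== PORT A =====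
def max_same (grid : List (List String)) : Int :=
  let n : Int := grid.length
  let ans : Int :=
    (PySem.List.pyRange 0 n 1).foldl (fun ans i =>
      let p : Int × Int :=
        (PySem.List.pyRange 1 n 1).foldl (fun (p : Int × Int) j =>
          if PySem.List.pyGetD (PySem.List.pyGetD grid i []) j "" ==
             PySem.List.pyGetD (PySem.List.pyGetD grid i []) (j - 1) "" then
            (p.1 + 1, p.2)
          else
            (1, if p.1 > p.2 then p.1 else p.2)) (1, ans)
      if p.1 > p.2 then p.1 else p.2) 1
  (PySem.List.pyRange 0 n 1).foldl (fun ans j =>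
    let p : Int × Int :=
      (PySem.List.pyRange 1 n 1).foldl (fun (p : Int × Int) i =>
        if PySem.List.pyGetD (PySem.List.pyGetD grid i []) j "" ==
           PySem.List.pyGetD (PySem.List.pyGetD grid (i - 1) []) j "" then
          (p.1 + 1, p.2)
        else
          (1, if p.1 > p.2 then p.1 else p.2)) (1, ans)
    if p.1 > p.2 then p.1 else p.2) ans

-- ===== PORT B =====
-- has_window(L): any line with a uniform window of length L (slice == slice shifted by one)
def hasWindowB (lines : List (List String)) (n L : Int) : Bool :=
  lines.any (fun line =>
    (PySem.List.pyRange 0 (n - L + 1) 1).any (fun i =>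
      PySem.List.slice line (some i) (some (i + L - 1)) ==
        PySem.List.slice line (some (i + 1)) (some (i + L))))

-- the 'while lo < hi' halving loop
def bsearchB (lines : List (List String)) (n lo hi : Int) : Int :=
  if h : lo < hi then
    let mid := PySem.Int.floordiv (lo + hi + 1) 2
    if hasWindowB lines n mid then bsearchB lines n mid hi
    else bsearchB lines n lo (mid - 1)
  else lo
termination_by (hi - lo).toNat
decreasing_by
  · have hb := PySem.Int.floordiv_two_mid_bounds (lo := lo + 1) (hi := hi) (by omega)
    rw [show lo + 1 + hi = lo + hi + 1 from by omega] at hb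
    omega
  · have hb := PySem.Int.floordiv_two_mid_bounds (lo := lo + 1) (hi := hi) (by omega)
    rw [show lo + 1 + hi = lo + hi + 1 from by omega] at hb
    omega

def max_same_alt (grid : List (List String)) : Int :=
  let n : Int := grid.length
  if n < 2 then 1  -- at most one cell per scanned line
  else
    let lines : List (List String) :=
      grid.map (fun row => PySem.List.slice row none (some n)) ++
        (PySem.List.pyRange 0 n 1).map (fun j => grid.map (fun row => PySem.List.pyGetD row j ""))
    bsearchB lines n 1 n

-- ===== PRECONDITION & SPEC =====
-- Pre_ excludes exactly the inputs on which A raises IndexError: a grid with at least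
-- two rows where some row is shorter than the number of rows.
def Pre_max_same (grid : List (List String)) : Prop :=
  grid.length ≤ 1 ∨ ∀ r ∈ grid, grid.length ≤ r.length
instance (grid : List (List String)) : Decidable (Pre_max_same grid) := by
  unfold Pre_max_same; infer_instance
def pvWitness_max_same : List (List String) := [["a", "b"], ["b", "b"]]

def Spec_max_same (grid : List (List String)) (out : Int) : Prop := out = max_same_alt grid
instance (grid : List (List String)) (out : Int) : Decidable (Spec_max_same grid out) := by
  unfold Spec_max_same; infer_instance

-- ===== CLAIM (what is proved, stated in full; the proofs are below) =====
def Claim_equal_max_same : Prop :=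
  ∀ (grid : List (List String)), Dom_max_same grid → Pre_max_same grid →
    Spec_max_same grid (max_same grid)

-- ===== LEMMAS AND PROOFS =====

-- ---- A-side characterisation: A computes the max over all run lengths ----

-- A's 'if cnt > ans then cnt else ans' update
def pick (p : Int × Int) : Int := if p.1 > p.2 then p.1 else p.2

-- A's inner loop as a structural recursion over the line's tail
def foldPairs : List String → String → Int × Int → Int × Int
  | [], _, st => st
  | y :: ys, prev, st =>
      foldPairs ys y (if y == prev then (st.1 + 1, st.2) else (1, pick st))

-- run lengths of a line whose current run has length cnt and last cell prev
def runsFrom : Int → String → List String → List Int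
  | cnt, _, [] => [cnt]
  | cnt, prev, y :: ys =>
      if y == prev then runsFrom (cnt + 1) y ys else cnt :: runsFrom 1 y ys

-- run lengths of a line
def runsB : List String → List Int
  | [] => []
  | x :: xs =>
    (1 + ((xs.takeWhile (fun y => y == x)).length : Int)) ::
      runsB (xs.dropWhile (fun y => y == x))
termination_by l => l.length
decreasing_by
  simpa using Nat.lt_succ_of_le (List.length_dropWhile_le _ _)

lemma pick_eq_max (p : Int × Int) : pick p = max p.2 p.1 := by
  unfold pick; rw [max_def]; split_ifs <;> omega

lemma getD_take_of_lt (l : List String) (n k : Nat) (h : k < n) :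
    (l.take n).getD k "" = l.getD k "" := by
  rw [List.getD_eq_getElem?_getD, List.getD_eq_getElem?_getD, List.getElem?_take]
  simp [h]

-- A's index-based inner loop equals foldPairs over the corresponding suffix
lemma innerA (l : List String) : ∀ (m k : Nat) (st : Int × Int), l.length - k ≤ m → 1 ≤ k →
    (PySem.List.pyRange (k : Int) (l.length : Int) 1).foldl
      (fun (p : Int × Int) j =>
        if PySem.List.pyGetD l j "" == PySem.List.pyGetD l (j - 1) "" then (p.1 + 1, p.2)
        else (1, pick p)) st
    = foldPairs (l.drop k) (l.getD (k - 1) "") st := by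
  intro m
  induction m with
  | zero =>
    intro k st hm hk
    have hlen : l.length ≤ k := by omega
    rw [PySem.List.pyRange_one_eq_nil (by exact_mod_cast hlen),
      List.drop_eq_nil_of_le hlen]
    rfl
  | succ m ih =>
    intro k st hm hk
    by_cases h : l.length ≤ k
    · rw [PySem.List.pyRange_one_eq_nil (by exact_mod_cast h), List.drop_eq_nil_of_le h]
      rfl
    · push Not at h
      rw [PySem.List.pyRange_one_cons (by exact_mod_cast h)]
      rw [List.foldl_cons]
      have hc1 : ((k : Int) - 1) = ((k - 1 : Nat) : Int) := by omega
      have hc2 : ((k : Int) + 1) = ((k + 1 : Nat) : Int) := by omega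
      rw [hc1, hc2, PySem.List.pyGetD_natCast, PySem.List.pyGetD_natCast]
      rw [ih (k + 1) _ (by omega) (by omega)]
      rw [List.drop_eq_getElem_cons h]
      show foldPairs _ _ _ = foldPairs (l[k] :: l.drop (k + 1)) (l.getD (k - 1) "") st
      rw [show (k + 1 - 1) = k from rfl]
      simp only [foldPairs, List.getD_eq_getElem l "" h]

-- the 'if cnt > ans' bookkeeping computes the running max over the run lengths
lemma foldPairs_runs : ∀ (ys : List String) (prev : String) (cnt ans : Int),
    pick (foldPairs ys prev (cnt, ans)) = (runsFrom cnt prev ys).foldl max ans := by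
  intro ys
  induction ys with
  | nil =>
    intro prev cnt ans
    simp only [foldPairs, runsFrom, List.foldl_cons, List.foldl_nil]
    exact pick_eq_max (cnt, ans)
  | cons y ys ih =>
    intro prev cnt ans
    by_cases hy : (y == prev) = true
    · simp only [foldPairs, runsFrom, hy, if_true]
      exact ih y (cnt + 1) ans
    · simp only [foldPairs, runsFrom, if_neg hy, List.foldl_cons]
      rw [ih y 1 _, pick_eq_max (cnt, ans)]

-- first run absorbs the matching prefix; the rest restarts on the next distinct cell
lemma runsFrom_shape (ys : List String) : ∀ (prev : String) (cnt : Int),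
    runsFrom cnt prev ys
    = (cnt + ((ys.takeWhile (fun y => y == prev)).length : Int)) ::
        (match ys.dropWhile (fun y => y == prev) with
         | [] => []
         | z :: zs => runsFrom 1 z zs) := by
  induction ys with
  | nil => intro prev cnt; simp [runsFrom]
  | cons y ys ih =>
    intro prev cnt
    by_cases hy : (y == prev) = true
    · have hyp : y = prev := eq_of_beq hy
      simp only [runsFrom, hy, if_true, List.takeWhile_cons, List.dropWhile_cons]
      rw [ih y (cnt + 1)]
      subst hyp
      simp only [List.length_cons]
      congr 1
      push_cast; ring
    · simp only [runsFrom, List.takeWhile_cons, List.dropWhile_cons, hy]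
      simp

lemma runsB_cons (x : String) (xs : List String) : runsB (x :: xs) = runsFrom 1 x xs := by
  rw [runsB, runsFrom_shape]
  rcases h : xs.dropWhile (fun y => y == x) with _ | ⟨z, zs⟩
  · simp [runsB]
  · have hle := List.length_dropWhile_le (fun y => y == x) xs
    rw [h] at hle
    rw [runsB_cons z zs]
termination_by xs.length
decreasing_by rw [h] at hle; exact Nat.lt_of_lt_of_le (by simp) hle

-- folding per-line maxima sequentially is one max over the concatenated run lists
lemma linesFold (ls : List (List String)) : ∀ (a : Int),
    ls.foldl (fun a l => (runsB l).foldl max a) a = (ls.flatMap runsB).foldl max a := by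
  induction ls with
  | nil => intro a; rfl
  | cons l ls ih => intro a; rw [List.foldl_cons, List.flatMap_cons, List.foldl_append, ih]

-- one line, stated over an access list r holding at least the n scanned cells
lemma perLine (n : Nat) (r : List String) (hn : 1 ≤ n) (hr : n ≤ r.length) (ans : Int) :
    pick ((PySem.List.pyRange 1 (n : Int) 1).foldl
        (fun (p : Int × Int) j =>
          if PySem.List.pyGetD r j "" == PySem.List.pyGetD r (j - 1) "" then (p.1 + 1, p.2)
          else (1, pick p)) (1, ans))
    = (runsB (r.take n)).foldl max ans := by
  have hl : (r.take n).length = n := by simp [List.length_take]; omega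
  have hb : (PySem.List.pyRange 1 (n : Int) 1).foldl
      (fun (p : Int × Int) j =>
        if PySem.List.pyGetD r j "" == PySem.List.pyGetD r (j - 1) "" then (p.1 + 1, p.2)
        else (1, pick p)) (1, ans)
    = (PySem.List.pyRange 1 ((r.take n).length : Int) 1).foldl
      (fun (p : Int × Int) j =>
        if PySem.List.pyGetD (r.take n) j "" == PySem.List.pyGetD (r.take n) (j - 1) "" then
          (p.1 + 1, p.2)
        else (1, pick p)) (1, ans) := by
    rw [hl]
    apply PySem.List.foldl_congr_mem
    intro acc j hj
    rw [PySem.List.mem_pyRange_one] at hj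
    rw [PySem.List.pyGetD_of_nonneg r "" (by omega), PySem.List.pyGetD_of_nonneg r "" (by omega),
      PySem.List.pyGetD_of_nonneg (r.take n) "" (by omega),
      PySem.List.pyGetD_of_nonneg (r.take n) "" (by omega),
      getD_take_of_lt r n j.toNat (by omega), getD_take_of_lt r n (j - 1).toNat (by omega)]
  rw [hb]
  rcases hx : r.take n with _ | ⟨x, xs⟩
  · rw [hx] at hl; simp at hl; omega
  · rw [← hx, hx]
    have h1 := innerA (x :: xs) (x :: xs).length 1 (1, ans) (by omega) (by omega)
    rw [show ((1 : Nat) : Int) = (1 : Int) from rfl] at h1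
    rw [h1]
    simp only [List.drop_one, List.tail_cons, List.getD]
    rw [runsB_cons]
    exact foldPairs_runs xs x 1 ans

lemma colAccess (grid : List (List String)) (j : Nat) (i : Int) (h0 : 0 ≤ i)
    (h1 : i < (grid.length : Int)) :
    PySem.List.pyGetD (PySem.List.pyGetD grid i []) (j : Int) ""
    = PySem.List.pyGetD (grid.map (fun r => r.getD j "")) i "" := by
  have hi : i.toNat < grid.length := by omega
  rw [PySem.List.pyGetD_of_nonneg grid [] h0, PySem.List.pyGetD_natCast,
    PySem.List.pyGetD_of_nonneg _ "" h0,
    List.getD_eq_getElem grid [] hi,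
    List.getD_eq_getElem (grid.map (fun r => r.getD j "")) "" (by simpa using hi),
    List.getElem_map]

-- A on a nonempty grid with long-enough rows = the max of all run lengths of the
-- truncated rows and of the columns
lemma A_char (r0 : List String) (rest : List (List String))
    (hrows : ∀ r ∈ (r0 :: rest), (r0 :: rest).length ≤ r.length) :
    max_same (r0 :: rest)
    = ((((r0 :: rest).map (fun r => r.take (r0 :: rest).length)) ++
        (List.range (r0 :: rest).length).map
          (fun j => (r0 :: rest).map (fun r => r.getD j ""))).flatMap runsB).foldl max 1 := by
  set g : List (List String) := r0 :: rest with hg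
  have hn1 : 1 ≤ g.length := by simp [hg]
  have hA : max_same g
      = (PySem.List.pyRange 0 (g.length : Int) 1).foldl
          (fun ans j =>
            pick ((PySem.List.pyRange 1 (g.length : Int) 1).foldl
              (fun (p : Int × Int) i =>
                if PySem.List.pyGetD (PySem.List.pyGetD g i []) j "" ==
                   PySem.List.pyGetD (PySem.List.pyGetD g (i - 1) []) j "" then
                  (p.1 + 1, p.2)
                else (1, pick p)) (1, ans)))
          ((PySem.List.pyRange 0 (g.length : Int) 1).foldl
            (fun ans i =>
              (fun r =>
                pick ((PySem.List.pyRange 1 (g.length : Int) 1).foldl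
                  (fun (p : Int × Int) j =>
                    if PySem.List.pyGetD r j "" == PySem.List.pyGetD r (j - 1) "" then
                      (p.1 + 1, p.2)
                    else (1, pick p)) (1, ans))) (PySem.List.pyGetD g i [])) 1) := rfl
  rw [hA]
  -- rows: index loop over the grid = structural loop over its rows
  rw [PySem.List.foldl_pyRange_zero_pyGetD' g ([] : List String)
    (fun ans r =>
      pick ((PySem.List.pyRange 1 (g.length : Int) 1).foldl
        (fun (p : Int × Int) j =>
          if PySem.List.pyGetD r j "" == PySem.List.pyGetD r (j - 1) "" then (p.1 + 1, p.2)
          else (1, pick p)) (1, ans))) 1]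
  rw [PySem.List.foldl_congr_mem g _
    (fun ans r => (runsB (r.take g.length)).foldl max ans) 1
    (fun acc r hr => perLine g.length r hn1 (hrows r hr) acc)]
  rw [← List.foldl_map (f := fun r : List String => r.take g.length)
    (g := fun ans l => (runsB l).foldl max ans), linesFold]
  -- columns: index loop over range n, each column read through colAccess
  rw [show (g.length : Int) = ((g.length : Nat) : Int) from rfl,
    PySem.List.pyRange_zero_nat g.length, List.foldl_map]
  rw [PySem.List.foldl_congr_mem (List.range g.length) _
    (fun ans j => (runsB (g.map (fun r => r.getD j ""))).foldl max ans) _ ?hcol]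
  case hcol =>
    intro acc j hj
    rw [List.mem_range] at hj
    have hb : (PySem.List.pyRange 1 (g.length : Int) 1).foldl
        (fun (p : Int × Int) i =>
          if PySem.List.pyGetD (PySem.List.pyGetD g i []) (j : Int) "" ==
             PySem.List.pyGetD (PySem.List.pyGetD g (i - 1) []) (j : Int) "" then
            (p.1 + 1, p.2)
          else (1, pick p)) (1, acc)
      = (PySem.List.pyRange 1 (g.length : Int) 1).foldl
        (fun (p : Int × Int) i =>
          if PySem.List.pyGetD (g.map (fun r => r.getD j "")) i "" ==
             PySem.List.pyGetD (g.map (fun r => r.getD j "")) (i - 1) "" then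
            (p.1 + 1, p.2)
          else (1, pick p)) (1, acc) := by
      apply PySem.List.foldl_congr_mem
      intro p i hi
      rw [PySem.List.mem_pyRange_one] at hi
      rw [colAccess g j i (by omega) (by omega), colAccess g j (i - 1) (by omega) (by omega)]
    rw [hb, perLine g.length (g.map (fun r => r.getD j "")) hn1 (by simp) acc,
      List.take_of_length_le (by simp)]
  rw [← List.foldl_map (f := fun j : Nat => g.map (fun r => r.getD j ""))
    (g := fun ans l => (runsB l).foldl max ans), linesFold]
  rw [List.flatMap_append, List.foldl_append]

-- ---- B-side: windows, runs, and the binary search ----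

lemma le_foldl_max (l : List Int) : ∀ (a L : Int),
    (L ≤ l.foldl max a ↔ L ≤ a ∨ ∃ x ∈ l, L ≤ x) := by
  induction l with
  | nil => intro a L; simp
  | cons x xs ih =>
    intro a L
    rw [List.foldl_cons, ih]
    constructor
    · rintro (h | h)
      · rcases le_max_iff.mp h with h | h
        · exact Or.inl h
        · exact Or.inr ⟨x, by simp, h⟩
      · obtain ⟨y, hy, hL⟩ := h
        exact Or.inr ⟨y, by simp [hy], hL⟩
    · rintro (h | ⟨y, hy, hL⟩)
      · exact Or.inl (le_max_iff.mpr (Or.inl h))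
      · rcases List.mem_cons.mp hy with rfl | hy
        · exact Or.inl (le_max_iff.mpr (Or.inr hL))
        · exact Or.inr ⟨y, hy, hL⟩

lemma foldl_max_le (l : List Int) : ∀ (a b : Int), a ≤ b → (∀ x ∈ l, x ≤ b) →
    l.foldl max a ≤ b := by
  induction l with
  | nil => intro a b h _; simpa
  | cons x xs ih =>
    intro a b h hx
    rw [List.foldl_cons]
    exact ih _ _ (max_le h (hx x (by simp))) (fun y hy => hx y (by simp [hy]))

lemma runsB_le (l : List String) : ∀ r ∈ runsB l, r ≤ (l.length : Int) := by
  match l with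
  | [] => simp [runsB]
  | x :: xs =>
    rw [runsB]
    intro r hr
    rcases List.mem_cons.mp hr with rfl | hr
    · have := (List.takeWhile_sublist (l := xs) (fun y => y == x)).length_le
      simp only [List.length_cons]; push_cast; omega
    · have h1 := runsB_le (xs.dropWhile (fun y => y == x)) r hr
      have h2 := List.length_dropWhile_le (fun y => y == x) xs
      simp only [List.length_cons]
      have : ((xs.dropWhile (fun y => y == x)).length : Int) ≤ (xs.length : Int) := by
        exact_mod_cast h2
      push_cast; omega
termination_by l.length
decreasing_by simpa using Nat.lt_succ_of_le (List.length_dropWhile_le _ _)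

-- a uniform window of length L starting at i (adjacent cells equal)
def U (l : List String) (i L : Nat) : Prop :=
  ∀ k, k + 1 < L → l.getD (i + k) "" = l.getD (i + k + 1) ""

lemma getD_drop (l : List String) (a k : Nat) :
    (l.drop a).getD k "" = l.getD (a + k) "" := by
  rw [List.getD_eq_getElem?_getD, List.getD_eq_getElem?_getD, List.getElem?_drop]

lemma U_const (l : List String) (i L : Nat) (h : U l i L) :
    ∀ k, k < L → l.getD (i + k) "" = l.getD i "" := by
  intro k
  induction k with
  | zero => intro _; rfl
  | succ k ih =>
    intro hk
    have h1 := h k (by omega)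
    have h2 := ih (by omega)
    rw [show i + (k + 1) = i + k + 1 from rfl, ← h1]
    exact h2

lemma head_of_eq_cons {A : Type} (l : List A) (z : A) (zs : List A)
    (h : l = z :: zs) (w : l ≠ []) : l.head w = z := by subst h; rfl

-- a uniform window of length L exists iff some run has length ≥ L
lemma window_iff_run (l : List String) (L : Nat) (hL : 1 ≤ L) :
    (∃ i, i + L ≤ l.length ∧ U l i L) ↔ ∃ r ∈ runsB l, (L : Int) ≤ r := by
  match l with
  | [] =>
    simp only [runsB, List.length_nil, List.not_mem_nil]
    constructor
    · rintro ⟨i, hi, _⟩; omega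
    · rintro ⟨r, hr, _⟩; exact absurd hr (by simp)
  | x :: xs =>
    set t := (xs.takeWhile (fun y => y == x)).length with htdef
    set rest := xs.dropWhile (fun y => y == x) with hrdef
    have ht_le : t ≤ xs.length := (List.takeWhile_sublist (fun y => y == x)).length_le
    have hrB : runsB (x :: xs) = (1 + (t : Int)) :: runsB rest := by rw [runsB]
    have hrest : rest = xs.drop t := by
      conv_lhs => rw [hrdef]
      conv_rhs => rw [show xs = xs.takeWhile (fun y => y == x) ++ xs.dropWhile (fun y => y == x)
        from (List.takeWhile_append_dropWhile).symm]
      rw [htdef, List.drop_left]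
    have hrest_len : rest.length = xs.length - t := by rw [hrest, List.length_drop]
    have hshift : ∀ m : Nat, (x :: xs).getD (t + 1 + m) "" = rest.getD m "" := by
      intro m
      have : (x :: xs).getD (t + 1 + m) "" = xs.getD (t + m) "" := by
        rw [show t + 1 + m = (t + m) + 1 from by omega]
        rfl
      rw [this, hrest, getD_drop]
    have hx_at : ∀ k, k ≤ t → (x :: xs).getD k "" = x := by
      intro k hk
      cases k with
      | zero => rfl
      | succ k =>
        have hk' : k < t := by omega
        have hkx : k < xs.length := lt_of_lt_of_le hk' ht_le
        show xs.getD k "" = x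
        rw [List.getD_eq_getElem _ _ hkx]
        have htk : xs.takeWhile (fun y => y == x) = xs.take t :=
          List.prefix_iff_eq_take.mp (List.takeWhile_prefix _)
        have hmem : (xs.takeWhile (fun y => y == x))[k]'(by omega) ∈
            xs.takeWhile (fun y => y == x) := List.getElem_mem (by omega)
        have hp := List.mem_takeWhile_imp hmem
        have hgk : (xs.takeWhile (fun y => y == x))[k]'(by omega) = xs[k] := by
          simp only [htk]
          exact List.getElem_take ..
        rw [hgk] at hp
        exact eq_of_beq hp
    have hIH := window_iff_run rest L hL
    constructor
    · rintro ⟨i, hiL, hU⟩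
      by_cases hi : t + 1 ≤ i
      · -- window lies inside rest
        have h1 : (i - (t + 1)) + L ≤ rest.length := by
          simp only [List.length_cons] at hiL; omega
        have h2 : U rest (i - (t + 1)) L := by
          intro k hk
          rw [← hshift, ← hshift, show t + 1 + (i - (t + 1) + k) = i + k from by omega,
            show t + 1 + (i - (t + 1) + k + 1) = i + k + 1 from by omega]
          exact hU k hk
        obtain ⟨r, hr, hLr⟩ := hIH.mp ⟨i - (t + 1), h1, h2⟩
        exact ⟨r, by rw [hrB]; exact List.mem_cons_of_mem _ hr, hLr⟩
      · -- window starts inside the first run: it cannot cross the boundary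
        have hit : i ≤ t := by omega
        have hend : i + L ≤ t + 1 := by
          by_contra hgt
          -- index t+1 lies inside the window, so the cell there equals x; but it is
          -- the head of rest, which differs from x
          have hiL' : i + L ≤ xs.length + 1 := by simpa using hiL
          have hrest_ne : rest ≠ [] := by
            intro hnil
            have h0 : rest.length = 0 := by rw [hnil]; rfl
            omega
          obtain ⟨z, zs, hzz⟩ := List.exists_cons_of_ne_nil hrest_ne
          have hin : t + 1 - i < L := by omega
          have hcell := U_const (x :: xs) i L hU (t + 1 - i) hin
          rw [show i + (t + 1 - i) = t + 1 from by omega, hx_at i hit] at hcell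
          have h0 := hshift 0
          rw [hzz] at h0
          simp only [Nat.add_zero] at h0
          rw [hcell, List.getD_cons_zero] at h0
          have hw : xs.dropWhile (fun y => y == x) ≠ [] := by
            rw [← hrdef, hzz]; simp
          have hdw : xs.dropWhile (fun y => y == x) = z :: zs := by rw [← hrdef]; exact hzz
          have hne := List.head_dropWhile_not (fun y => y == x) hw
          rw [head_of_eq_cons _ z zs hdw hw] at hne
          rw [← h0] at hne
          simp at hne
        refine ⟨1 + (t : Int), by rw [hrB]; exact List.mem_cons_self, by omega⟩
    · rintro ⟨r, hr, hLr⟩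
      rw [hrB] at hr
      rcases List.mem_cons.mp hr with rfl | hr
      · -- the first run: window at 0
        have hLt : L ≤ t + 1 := by omega
        refine ⟨0, by simp only [List.length_cons]; omega, ?_⟩
        intro k hk
        simp only [Nat.zero_add]
        rw [hx_at k (by omega), hx_at (k + 1) (by omega)]
      · -- a later run: shift its window past the first segment
        obtain ⟨i', h1, h2⟩ := hIH.mpr ⟨r, hr, hLr⟩
        refine ⟨t + 1 + i', ?_, ?_⟩
        · simp only [List.length_cons]; omega
        · intro k hk
          rw [show t + 1 + i' + k = t + 1 + (i' + k) from by omega,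
            show t + 1 + (i' + k) + 1 = t + 1 + (i' + k + 1) from by omega,
            hshift, hshift]
          exact h2 k hk
termination_by l.length
decreasing_by simpa using Nat.lt_succ_of_le (List.length_dropWhile_le _ _)

-- two equally long windows coincide iff the cells agree pointwise
lemma take_drop_eq_iff (l : List String) (a b m : Nat)
    (ha : a + m ≤ l.length) (hb : b + m ≤ l.length) :
    ((l.drop a).take m = (l.drop b).take m) ↔
      ∀ k < m, l.getD (a + k) "" = l.getD (b + k) "" := by
  have hla : ((l.drop a).take m).length = m := by simp; omega
  have hlb : ((l.drop b).take m).length = m := by simp; omega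
  constructor
  · intro h k hk
    have := congrArg (fun s => s.getD k "") h
    simpa [List.getD_eq_getElem?_getD, List.getElem?_take, hk, List.getElem?_drop] using this
  · intro h
    apply List.ext_getElem (by rw [hla, hlb])
    intro k hk1 hk2
    rw [hla] at hk1
    have hk := h k hk1
    rw [List.getD_eq_getElem _ _ (by omega), List.getD_eq_getElem _ _ (by omega)] at hk
    simpa [List.getElem_take, List.getElem_drop] using hk

-- the decision procedure: some line has a uniform window of length L
lemma hasWindow_iff (lines : List (List String)) (n : Nat) (L : Int)
    (hlen : ∀ l ∈ lines, l.length = n) (hL : 1 ≤ L) :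
    (hasWindowB lines (n : Int) L = true ↔ ∃ r ∈ lines.flatMap runsB, L ≤ r) := by
  unfold hasWindowB
  rw [List.any_eq_true]
  constructor
  · rintro ⟨line, hline, hany⟩
    rw [List.any_eq_true] at hany
    obtain ⟨i, hi, hslice⟩ := hany
    rw [PySem.List.mem_pyRange_one] at hi
    set j := i.toNat with hjdef
    have hij : i = (j : Int) := by omega
    have hjL : j + L.toNat ≤ n := by omega
    have hlenl := hlen line hline
    have hs1 : PySem.List.slice line (some i) (some (i + L - 1))
        = (line.drop j).take (L.toNat - 1) := by
      rw [hij, show (j : Int) + L - 1 = ((j + (L.toNat - 1) : Nat) : Int) from by omega,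
        PySem.List.slice_natCast]
      congr 1; omega
    have hs2 : PySem.List.slice line (some (i + 1)) (some (i + L))
        = (line.drop (j + 1)).take (L.toNat - 1) := by
      rw [hij, show (j : Int) + 1 = ((j + 1 : Nat) : Int) from by omega,
        show (j : Int) + L = (((j + 1) + (L.toNat - 1) : Nat) : Int) from by omega,
        PySem.List.slice_natCast]
      congr 1; omega
    rw [hs1, hs2, beq_iff_eq] at hslice
    have hU : U line j L.toNat := by
      have := (take_drop_eq_iff line j (j + 1) (L.toNat - 1)
        (by omega) (by omega)).mp hslice
      intro k hk
      have hk' := this k (by omega)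
      rw [show j + 1 + k = j + k + 1 from by omega] at hk'
      exact hk'
    have hw : ∃ i', i' + L.toNat ≤ line.length ∧ U line i' L.toNat :=
      ⟨j, by omega, hU⟩
    obtain ⟨r, hr, hLr⟩ := (window_iff_run line L.toNat (by omega)).mp hw
    exact ⟨r, List.mem_flatMap.mpr ⟨line, hline, hr⟩, by omega⟩
  · rintro ⟨r, hr, hLr⟩
    obtain ⟨line, hline, hrl⟩ := List.mem_flatMap.mp hr
    have hlenl := hlen line hline
    obtain ⟨j, hjL, hU⟩ := (window_iff_run line L.toNat (by omega)).mpr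
      ⟨r, hrl, by omega⟩
    refine ⟨line, hline, ?_⟩
    rw [List.any_eq_true]
    refine ⟨(j : Int), ?_, ?_⟩
    · rw [PySem.List.mem_pyRange_one]; omega
    · have hs1 : PySem.List.slice line (some (j : Int)) (some ((j : Int) + L - 1))
          = (line.drop j).take (L.toNat - 1) := by
        rw [show (j : Int) + L - 1 = ((j + (L.toNat - 1) : Nat) : Int) from by omega,
          PySem.List.slice_natCast]
        congr 1; omega
      have hs2 : PySem.List.slice line (some ((j : Int) + 1)) (some ((j : Int) + L))
          = (line.drop (j + 1)).take (L.toNat - 1) := by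
        rw [show (j : Int) + 1 = ((j + 1 : Nat) : Int) from by omega,
          show (j : Int) + L = (((j + 1) + (L.toNat - 1) : Nat) : Int) from by omega,
          PySem.List.slice_natCast]
        congr 1; omega
      rw [hs1, hs2, beq_iff_eq]
      apply (take_drop_eq_iff line j (j + 1) (L.toNat - 1)
        (by omega) (by omega)).mpr
      intro k hk
      rw [show j + 1 + k = j + k + 1 from by omega]
      exact hU k (by omega)

-- correctness of the halving loop
lemma bsearch_correct (lines : List (List String)) (n M lo hi : Int)
    (h1 : lo ≤ M) (h2 : M ≤ hi)
    (h3 : ∀ L, lo < L → L ≤ hi → (hasWindowB lines n L = true ↔ L ≤ M)) :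
    bsearchB lines n lo hi = M := by
  rw [bsearchB]
  by_cases h : lo < hi
  · rw [dif_pos h]
    have hb := PySem.Int.floordiv_two_mid_bounds (lo := lo + 1) (hi := hi) (by omega)
    rw [show lo + 1 + hi = lo + hi + 1 from by omega] at hb
    set mid := PySem.Int.floordiv (lo + hi + 1) 2 with hmid
    have hb' : lo + 1 ≤ mid ∧ mid ≤ hi := by
      constructor
      · have := hb.1; omega
      · have := hb.2; omega
    by_cases hw : hasWindowB lines n mid = true
    · rw [if_pos hw]
      have hmidM : mid ≤ M := (h3 mid (by omega) (by omega)).mp hw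
      exact bsearch_correct lines n M mid hi hmidM h2
        (fun L hx hy => h3 L (by omega) hy)
    · rw [if_neg hw]
      have hMmid : ¬ (mid ≤ M) := fun hc => hw ((h3 mid (by omega) (by omega)).mpr hc)
      exact bsearch_correct lines n M lo (mid - 1) h1 (by omega)
        (fun L hx hy => h3 L hx (by omega))
  · rw [dif_neg h]
    omega
termination_by (hi - lo).toNat
decreasing_by
  · omega
  · omega

-- ===== VERDICT (by name: the statement is the Claim_ definition above) =====
theorem max_same_spec : Claim_equal_max_same := by
  intro grid _ hpre
  unfold Spec_max_same
  by_cases hn2 : grid.length < 2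
  · -- n ≤ 1: both programs return 1
    have hB : max_same_alt grid = 1 := by
      simp only [max_same_alt]
      rw [if_pos (by exact_mod_cast hn2)]
    rw [hB]
    rcases grid with _ | ⟨r0, rest⟩
    · decide
    · rcases rest with _ | ⟨r1, rs⟩
      · show max_same [r0] = 1
        norm_num [max_same, show PySem.List.pyRange 0 1 1 = [0] from rfl,
          show PySem.List.pyRange 1 1 1 = ([] : List Int) from rfl]
      · simp at hn2
  · -- n ≥ 2
    push Not at hn2
    have hrows : ∀ r ∈ grid, grid.length ≤ r.length := by
      rcases hpre with h | h
      · exact fun r hr => absurd h (by omega)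
      · exact h
    rcases grid with _ | ⟨r0, rest⟩
    · simp at hn2
    set g : List (List String) := r0 :: rest with hg
    set rows : List (List String) := g.map (fun r => r.take g.length) with hrowsdef
    set colsT : List (List String) :=
      (List.range g.length).map (fun j => g.map (fun r => r.getD j "")) with hcolsdef
    have hlines : (g.map (fun row => PySem.List.slice row none (some (g.length : Int))) ++
        (PySem.List.pyRange 0 (g.length : Int) 1).map
          (fun j => g.map (fun row => PySem.List.pyGetD row j "")))
        = rows ++ colsT := by
      congr 1
      · apply List.map_congr_left
        intro r _
        exact PySem.List.slice_to_natCast r g.length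
      · rw [show ((g.length : Int)) = ((g.length : Nat) : Int) from rfl,
          PySem.List.pyRange_zero_nat, List.map_map]
        apply List.map_congr_left
        intro j _
        simp [PySem.List.pyGetD_natCast]
    have hB : max_same_alt g = bsearchB (rows ++ colsT) (g.length : Int) 1 (g.length : Int) := by
      simp only [max_same_alt]
      rw [if_neg (by push Not; exact_mod_cast hn2), hlines]
    have hlen : ∀ l ∈ rows ++ colsT, l.length = g.length := by
      intro l hl
      rcases List.mem_append.mp hl with hl | hl
      · obtain ⟨r, hr, rfl⟩ := List.mem_map.mp hl
        have := hrows r hr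
        simp [List.length_take]
        omega
      · obtain ⟨j, _, rfl⟩ := List.mem_map.mp hl
        simp
    set M : Int := (((rows ++ colsT).flatMap runsB).foldl max 1) with hM
    have hM1 : 1 ≤ M := (le_foldl_max _ 1 1).mpr (Or.inl le_rfl)
    have hMn : M ≤ (g.length : Int) := by
      apply foldl_max_le
      · exact_mod_cast hn2.trans' (by norm_num)
      · intro x hx
        obtain ⟨line, hline, hrl⟩ := List.mem_flatMap.mp hx
        have := runsB_le line x hrl
        rw [hlen line hline] at this
        exact this
    rw [A_char r0 rest hrows, hB, ← hrowsdef, ← hcolsdef, ← hM]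
    symm
    apply bsearch_correct (rows ++ colsT) (g.length : Int) M 1 (g.length : Int) hM1 hMn
    intro L hlo hhi
    rw [hasWindow_iff (rows ++ colsT) g.length L hlen (by omega), hM,
      le_foldl_max]
    constructor
    · rintro ⟨r, hr, hLr⟩
      exact Or.inr ⟨r, hr, hLr⟩
    · rintro (h | h)
      · omega
      · exact h
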